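-- pv_equiv track=rewrite | github.com/rhshadrach/cerbursus | cerbursus/_base.py | reduce_headers
-- ===== SOURCE A (Python) =====
-- def reduce_headers(headers):
--     if len(headers) == 1:
--         return []
--     taker = [0]
--     level = headers[-2]
--     for k, (prev_label, label) in enumerate(zip(level[1:], level)):
--         if prev_label != label:
--             taker.append(k + 1)
--     result = [[level[idx] for idx in taker] for level in headers[:-1]]
--     return result
-- ===== SOURCE B (Python) =====
-- def reduce_headers(headers):
--     if len(headers) == 1:
--         return []
--     level = headers[-2]
--     rows = headers[:-1]
--     cols = list(zip(*rows))
--     kept = [cols[0]]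
--     last = level[0]
--     for k in range(1, len(level)):
--         cur = level[k]
--         if cur != last:
--             kept.append(cols[k])
--         last = cur
--     return [list(col) for col in zip(*kept)]
-- ===== Notes on version B (the rewrite author's own statement) =====
-- stated objective: alternative
-- what changed: B works in column space instead of index space: it transposes headers[:-1] with zip(*rows) into whole columns, keeps column 0 and every column where the deciding level's label differs from the previous one (tracked in a running `last` variable), and transposes the kept columns back with zip(*kept); A instead materializes a `taker` index list and gathers per row with a nested comprehension.
import Mathlib
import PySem

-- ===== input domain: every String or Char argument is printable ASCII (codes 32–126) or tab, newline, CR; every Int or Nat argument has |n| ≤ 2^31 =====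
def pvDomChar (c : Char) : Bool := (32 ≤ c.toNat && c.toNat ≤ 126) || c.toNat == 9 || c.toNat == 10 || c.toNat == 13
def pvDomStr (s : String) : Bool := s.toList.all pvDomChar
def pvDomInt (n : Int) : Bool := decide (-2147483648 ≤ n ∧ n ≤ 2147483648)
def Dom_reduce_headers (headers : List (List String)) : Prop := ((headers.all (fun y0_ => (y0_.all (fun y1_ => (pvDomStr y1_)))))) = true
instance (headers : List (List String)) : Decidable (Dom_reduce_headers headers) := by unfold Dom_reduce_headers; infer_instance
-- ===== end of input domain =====

-- B works in column space: transpose headers[:-1] with zip(*rows), keep the columns where the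
-- deciding level's label changes, and transpose back (objective: alternative, same cost).

-- ===== PORT A =====
def reduce_headers (headers : List (List String)) : List (List String) :=
  if headers.length = 1 then []
  else
    -- headers[-2]; none = IndexError (headers == []), excluded by Pre_
    match PySem.List.pyGet? headers (-2) with
    | none => []
    | some level =>
      let taker : List Int :=
        (PySem.List.enumerate ((PySem.List.slice level (some 1)).zip level)).foldl
          (fun acc kp => if kp.2.1 ≠ kp.2.2 then acc ++ [kp.1 + 1] else acc) [0]
      -- [[level[idx] for idx in taker] for level in headers[:-1]]; .getD "" = IndexError, excluded by Pre_
      (PySem.List.slice headers none (some (-1))).map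
        (fun lv => taker.map (fun idx => (PySem.List.pyGet? lv idx).getD ""))

-- ===== PORT B =====
-- list(zip(*rows)): transpose truncated to the shortest row (tuples rendered as lists)
lemma pvZipDec (rows : List (List String)) (hne : ¬ rows = []) (hall : ¬ rows.any (fun r => r.isEmpty) = true) :
    ((rows.map (fun r => r.tail)).map List.length).sum < (rows.map List.length).sum := by
  cases rows with
  | nil => exact absurd rfl hne
  | cons r rs =>
    simp only [List.any_cons, Bool.or_eq_true, not_or] at hall
    have h1 : r ≠ [] := by
      intro h; subst h; simp at hall
    have hr : r.tail.length < r.length := by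
      cases r with
      | nil => exact absurd rfl h1
      | cons a t => simp
    have hs : ((rs.map (fun r => r.tail)).map List.length).sum ≤ (rs.map List.length).sum := by
      rw [List.map_map]
      apply List.sum_le_sum
      intro x _
      simp only [Function.comp_apply, List.length_tail]
      omega
    simp only [List.map_cons, List.sum_cons]
    omega

def zipStar (rows : List (List String)) : List (List String) :=
  if h : rows = [] ∨ rows.any (fun r => r.isEmpty) = true then []
  else (rows.map (fun r => r.headI)) :: zipStar (rows.map (fun r => r.tail))
termination_by (rows.map List.length).sum
decreasing_by
  push_neg at h
  have := pvZipDec rows h.1 h.2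
  simpa using this

def reduce_headers_alt (headers : List (List String)) : List (List String) :=
  if headers.length = 1 then []
  else
    match PySem.List.pyGet? headers (-2) with
    | none => []   -- IndexError (headers == []), excluded by Pre_
    | some level =>
      let rows := PySem.List.slice headers none (some (-1))
      let cols := zipStar rows
      -- cols[0] / level[0]; none = IndexError (an empty row / empty deciding level), excluded by Pre_
      match PySem.List.pyGet? cols 0, PySem.List.pyGet? level 0 with
      | some c0, some l0 =>
        let res := (PySem.List.pyRange 1 (level.length : Int)).foldl
          (fun st k =>
            let cur := (PySem.List.pyGet? level k).getD ""
            ((if cur ≠ st.2 then st.1 ++ [(PySem.List.pyGet? cols k).getD []] else st.1), cur))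
          ([c0], l0)
        zipStar res.1
      | _, _ => []

-- ===== PRECONDITION & SPEC =====
-- Pre_ excludes exactly the inputs on which Python A raises IndexError: empty `headers`
-- (headers[-2]), or some row of headers[:-1] too short for a gathered column index
-- (index 0, or a boundary index k+1 where level[k+1] != level[k]).
def Pre_reduce_headers (headers : List (List String)) : Prop :=
  headers.length = 1 ∨
  (2 ≤ headers.length ∧
    ∀ r ∈ headers.dropLast, 0 < r.length ∧
      ∀ k < (headers.dropLast.getLastD []).length - 1,
        (headers.dropLast.getLastD []).getD (k + 1) "" ≠ (headers.dropLast.getLastD []).getD k "" →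
          k + 1 < r.length)
instance (headers : List (List String)) : Decidable (Pre_reduce_headers headers) := by
  unfold Pre_reduce_headers; infer_instance

def pvWitness_reduce_headers : List (List String) :=
  [["a", "a", "b"], ["x", "y", "y"], ["p", "q", "r"]]

def Spec_reduce_headers (headers : List (List String)) (out : List (List String)) : Prop := out = reduce_headers_alt headers
instance (headers : List (List String)) (out : List (List String)) : Decidable (Spec_reduce_headers headers out) := by unfold Spec_reduce_headers; infer_instance

-- ===== CLAIM (what is proved, stated in full; the proofs are below) =====
def Claim_equal_reduce_headers : Prop := ∀ (headers : List (List String)), Dom_reduce_headers headers → Pre_reduce_headers headers → Spec_reduce_headers headers (reduce_headers headers)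

-- ===== LEMMAS AND PROOFS =====

-- the boundary indices of `level`, offset by j: j+k for each k ≥ 1 with level[k] ≠ level[k-1]
def pvBnds : List String → Int → List Int
  | [], _ => []
  | [_], _ => []
  | a :: b :: rest, j => (if b ≠ a then [j + 1] else []) ++ pvBnds (b :: rest) (j + 1)

lemma pvGetShift (x : String) (xs : List String) (i : Int) (h : 1 ≤ i) :
    PySem.List.pyGet? (x :: xs) i = PySem.List.pyGet? xs (i - 1) := by
  obtain ⟨n, rfl⟩ : ∃ n : Nat, i = (n : Int) + 1 := ⟨(i - 1).toNat, by omega⟩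
  rw [PySem.List.pyGet?_cons_succ]
  congr 1
  omega

-- A's taker loop produces the boundary indices
lemma pvA1 (level : List String) (j : Int) (acc : List Int) :
    (PySem.List.enumerate ((level.tail).zip level) j).foldl
      (fun acc kp => if kp.2.1 ≠ kp.2.2 then acc ++ [kp.1 + 1] else acc) acc
    = acc ++ pvBnds level j := by
  induction level generalizing j acc with
  | nil => simp [pvBnds]
  | cons a t ih =>
    cases t with
    | nil => simp [pvBnds]
    | cons b rest =>
      simp only [List.tail_cons, List.zip_cons_cons, PySem.List.enumerate_cons, List.foldl_cons]
      simp only [List.tail_cons] at ih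
      by_cases h : b ≠ a
      · rw [if_pos h, ih (j + 1) (acc ++ [j + 1])]
        simp [pvBnds, h]
      · rw [if_neg h, ih (j + 1) acc]
        simp [pvBnds, h]

-- the range filter by neighbour comparison produces the same boundary indices
lemma pvB1 (level : List String) (j : Int) :
    (PySem.List.pyRange (j + 1) (j + (level.length : Int))).filter
      (fun k => decide ((PySem.List.pyGet? level (k - j)).getD "" ≠ (PySem.List.pyGet? level (k - j - 1)).getD ""))
    = pvBnds level j := by
  induction level generalizing j with
  | nil => rw [PySem.List.pyRange_one_eq_nil (by simp)]; simp [pvBnds]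
  | cons a t ih =>
    cases t with
    | nil =>
      rw [PySem.List.pyRange_one_eq_nil (by simp)]
      simp [pvBnds]
    | cons b rest =>
      have hlen : ((a :: b :: rest : List String).length : Int) = (rest.length : Int) + 1 + 1 := by
        simp
      rw [hlen]
      rw [PySem.List.pyRange_one_cons (by have := Int.natCast_nonneg rest.length; omega)]
      simp only [List.filter_cons]
      have e1 : j + 1 - j = (1 : Int) := by ring
      have g1 : PySem.List.pyGet? (a :: b :: rest) (1 : Int) = some b := by
        rw [pvGetShift a _ 1 (le_refl 1)]
        norm_num [PySem.List.pyGet?_zero_cons]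
      have g0 : PySem.List.pyGet? (a :: b :: rest) (0 : Int) = some a :=
        PySem.List.pyGet?_zero_cons a _
      have htail :
          (PySem.List.pyRange (j + 1 + 1) (j + ((rest.length : Int) + 1 + 1))).filter
            (fun k => decide ((PySem.List.pyGet? (a :: b :: rest) (k - j)).getD "" ≠ (PySem.List.pyGet? (a :: b :: rest) (k - j - 1)).getD ""))
          = pvBnds (b :: rest) (j + 1) := by
        rw [← ih (j + 1)]
        have hb : j + ((rest.length : Int) + 1 + 1) = (j + 1) + (((b :: rest : List String)).length : Int) := by
          simp [List.length_cons]; ring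
        rw [hb]
        apply List.filter_congr
        intro k hk
        have hk1 : j + 1 + 1 ≤ k := (PySem.List.mem_pyRange_one.mp hk).1
        rw [pvGetShift a _ (k - j) (by omega), pvGetShift a _ (k - j - 1) (by omega)]
        have e3 : k - (j + 1) = k - j - 1 := by ring
        rw [e3]
      rw [htail]
      have e2' : (1 : Int) - 1 = 0 := by norm_num
      simp only [e1, e2', g1, g0]
      by_cases h : b ≠ a
      · simp [pvBnds, h]
      · simp [pvBnds, h]

-- members of pvBnds level 0 are genuine boundary positions of level
lemma pvBnds_mem (level : List String) (j k : Int) (hk : k ∈ pvBnds level j) :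
    ∃ m : Nat, k = j + (m : Int) + 1 ∧ m + 1 < level.length ∧
      level.getD (m + 1) "" ≠ level.getD m "" := by
  induction level generalizing j with
  | nil => simp [pvBnds] at hk
  | cons a t ih =>
    cases t with
    | nil => simp [pvBnds] at hk
    | cons b rest =>
      simp only [pvBnds, List.mem_append] at hk
      rcases hk with hk | hk
      · by_cases h : b ≠ a
        · rw [if_pos h] at hk
          simp at hk
          exact ⟨0, by omega, by simp, by simpa using h⟩
        · rw [if_neg h] at hk; simp at hk
      · obtain ⟨m, hm1, hm2, hm3⟩ := ih (j + 1) hk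
        refine ⟨m + 1, by push_cast; omega, ?_, by simpa using hm3⟩
        simp only [List.length_cons] at hm2 ⊢
        omega

-- ranges are chains of consecutive integers
lemma pvChainAux (n : Nat) (a b : Int) (hn : (b - a).toNat ≤ n) :
    (PySem.List.pyRange a b).IsChain (fun x y => y = x + 1) := by
  induction n generalizing a b with
  | zero =>
    rw [PySem.List.pyRange_one_eq_nil (by omega)]
    exact List.isChain_nil
  | succ n ih =>
    by_cases h : a < b
    · rw [PySem.List.pyRange_one_cons h]
      by_cases h2 : a + 1 < b
      · rw [PySem.List.pyRange_one_cons h2, List.isChain_cons_cons]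
        refine ⟨rfl, ?_⟩
        rw [← PySem.List.pyRange_one_cons h2]
        exact ih (a + 1) b (by omega)
      · rw [PySem.List.pyRange_one_eq_nil (by omega)]
        simp
    · rw [PySem.List.pyRange_one_eq_nil (by omega)]
      exact List.isChain_nil

lemma pvChain (a b : Int) : (PySem.List.pyRange a b).IsChain (fun x y => y = x + 1) :=
  pvChainAux (b - a).toNat a b le_rfl

-- B's stateful single pass, characterised as append-at-boundaries
lemma pvFoldState (level : List String) (cols : List (List String)) (ks : List Int)
    (hch : ks.IsChain (fun x y => y = x + 1))
    (kept : List (List String)) (last : String)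
    (hlast : ∀ k0, ks.head? = some k0 → last = (PySem.List.pyGet? level (k0 - 1)).getD "") :
    (ks.foldl
      (fun st k =>
        let cur := (PySem.List.pyGet? level k).getD ""
        ((if cur ≠ st.2 then st.1 ++ [(PySem.List.pyGet? cols k).getD []] else st.1), cur))
      (kept, last)).1
    = kept ++ (ks.filter
        (fun k => decide ((PySem.List.pyGet? level k).getD "" ≠ (PySem.List.pyGet? level (k - 1)).getD ""))).map
        (fun k => (PySem.List.pyGet? cols k).getD []) := by
  induction ks generalizing kept last with
  | nil => simp
  | cons k t ih =>
    have hl : last = (PySem.List.pyGet? level (k - 1)).getD "" := hlast k rfl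
    have hch' : t.IsChain (fun x y => y = x + 1) := hch.tail
    have hnext : ∀ k0, t.head? = some k0 →
        ((PySem.List.pyGet? level k).getD "" : String) = (PySem.List.pyGet? level (k0 - 1)).getD "" := by
      intro k0 hk0
      cases t with
      | nil => simp at hk0
      | cons b t' =>
        simp only [List.head?_cons, Option.some.injEq] at hk0
        have hb := List.rel_of_isChain_cons_cons hch
        rw [← hk0, hb]
        norm_num
    simp only [List.foldl_cons, List.filter_cons]
    by_cases h : (PySem.List.pyGet? level k).getD "" ≠ (PySem.List.pyGet? level (k - 1)).getD ""
    · rw [← hl] at h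
      rw [if_pos h, ih hch' _ _ hnext]
      rw [hl] at h
      simp [h]
    · rw [← hl] at h
      rw [if_neg h, ih hch' _ _ hnext]
      rw [hl] at h
      simp [h]

-- zipStar at a valid index is the column
lemma pvZipGet (n : Nat) (rows : List (List String)) (hne : rows ≠ [])
    (hlen : ∀ r ∈ rows, n < r.length) :
    PySem.List.pyGet? (zipStar rows) (n : Int)
      = some (rows.map (fun r => (PySem.List.pyGet? r (n : Int)).getD "")) := by
  induction n generalizing rows with
  | zero =>
    have hany : ¬ (rows = [] ∨ rows.any (fun r => r.isEmpty) = true) := by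
      rintro (rfl | hx)
      · exact hne rfl
      · obtain ⟨r, hr, hre⟩ := List.any_eq_true.mp hx
        have := hlen r hr
        rw [List.isEmpty_iff.mp hre] at this
        simp at this
    rw [zipStar, dif_neg hany]
    simp only [Nat.cast_zero, PySem.List.pyGet?_zero_cons, Option.some.injEq]
    apply List.map_congr_left
    intro r hr
    have := hlen r hr
    cases r with
    | nil => simp at this
    | cons a t => simp [PySem.List.pyGet?_zero_cons]
  | succ n ih =>
    have hany : ¬ (rows = [] ∨ rows.any (fun r => r.isEmpty) = true) := by
      rintro (rfl | hx)
      · exact hne rfl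
      · obtain ⟨r, hr, hre⟩ := List.any_eq_true.mp hx
        have := hlen r hr
        rw [List.isEmpty_iff.mp hre] at this
        simp at this
    rw [zipStar, dif_neg hany]
    have hcast : ((n + 1 : Nat) : Int) = (n : Int) + 1 := by push_cast; ring
    rw [hcast, PySem.List.pyGet?_cons_succ]
    rw [ih (rows.map (fun r => r.tail)) (by simpa using hne) ?_]
    · simp only [List.map_map, Option.some.injEq]
      apply List.map_congr_left
      intro r hr
      have := hlen r hr
      cases r with
      | nil => simp at this
      | cons a t =>
        simp only [Function.comp, List.tail_cons]
        rw [PySem.List.pyGet?_cons_succ]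
    · intro t ht
      simp only [List.mem_map] at ht
      obtain ⟨r, hr, rfl⟩ := ht
      have := hlen r hr
      simp [List.length_tail]
      omega

-- transposing a list of gathered columns back yields the per-row gather
lemma pvZipMapT (rows : List (List String)) (ks : List Int) (f : List String → Int → String)
    (hks : ks ≠ []) :
    zipStar (ks.map (fun k => rows.map (fun r => f r k)))
      = rows.map (fun r => ks.map (fun k => f r k)) := by
  induction rows with
  | nil =>
    rw [zipStar, dif_pos]
    · simp
    · right
      cases ks with
      | nil => exact absurd rfl hks
      | cons k t => simp
  | cons r rs ih =>
    have hany : ¬ ((ks.map (fun k => (r :: rs).map (fun r => f r k))) = []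
        ∨ (ks.map (fun k => (r :: rs).map (fun r => f r k))).any (fun r => r.isEmpty) = true) := by
      rintro (hnil | hx)
      · exact hks (List.map_eq_nil_iff.mp hnil)
      · obtain ⟨x, hx2, hxe⟩ := List.any_eq_true.mp hx
        obtain ⟨k, _, rfl⟩ := List.mem_map.mp hx2
        simp at hxe
    rw [zipStar, dif_neg hany]
    refine congrArg₂ List.cons ?_ ?_
    · simp [Function.comp]
    · have h2 : (ks.map ((fun (x : List String) => x.tail) ∘ fun k => (r :: rs).map (fun r => f r k)))
          = ks.map (fun k => rs.map (fun r => f r k)) := by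
        simp [Function.comp]
      rw [List.map_map, h2, ih]

-- ===== VERDICT (by name: the statement is the Claim_ definition above) =====
theorem reduce_headers_spec : Claim_equal_reduce_headers := by
  intro headers _hdom hpre
  show reduce_headers headers = reduce_headers_alt headers
  rcases hpre with h1 | ⟨h2, hrows⟩
  · rw [reduce_headers, reduce_headers_alt, if_pos h1, if_pos h1]
  · have h1 : ¬ headers.length = 1 := by omega
    have hdl : headers.dropLast.length = headers.length - 1 := List.length_dropLast
    have hdne : headers.dropLast ≠ [] := by
      intro h
      rw [h] at hdl
      simp at hdl
      omega
    set L := headers.dropLast.getLastD [] with hLdef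
    have hLmem : L ∈ headers.dropLast := by
      have hLlast : L = headers.dropLast.getLast hdne := by
        rw [hLdef, List.getLastD_eq_getLast?, List.getLast?_eq_getLast hdne]
        rfl
      rw [hLlast]
      exact List.getLast_mem hdne
    have hg : PySem.List.pyGet? headers (-2) = some L := by
      rw [PySem.List.pyGet?_neg_ofNat headers 2 (by omega) (by omega)]
      rw [List.getElem?_eq_getElem (by omega)]
      congr 1
      have hLe : L = headers.dropLast[headers.length - 2]'(by omega) := by
        rw [hLdef, List.getLastD_eq_getLast?, List.getLast?_eq_getElem?,
          List.getElem?_eq_getElem (by omega)]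
        simp only [Option.getD_some]
        congr 1
        omega
      rw [hLe, List.getElem_dropLast]
    have hrs : PySem.List.slice headers none (some (-1)) = headers.dropLast :=
      PySem.List.slice_to_neg_one headers
    set rows := headers.dropLast with hrowsdef
    have hrne : rows ≠ [] := hdne
    have hr0 : ∀ r ∈ rows, 0 < r.length := fun r hr => (hrows r hr).1
    have hLne : 0 < L.length := hr0 L hLmem
    -- column 0 and level[0]
    have hc0 : PySem.List.pyGet? (zipStar rows) ((0 : Nat) : Int)
        = some (rows.map (fun r => (PySem.List.pyGet? r ((0 : Nat) : Int)).getD "")) :=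
      pvZipGet 0 rows hrne (fun r hr => hr0 r hr)
    have hc0' : PySem.List.pyGet? (zipStar rows) (0 : Int)
        = some (rows.map (fun r => (PySem.List.pyGet? r (0 : Int)).getD "")) := by
      simpa using hc0
    have hL0 : PySem.List.pyGet? L (0 : Int) = some (L[0]'hLne) := by
      rw [PySem.List.pyGet?_zero, List.getElem?_eq_getElem hLne]
    -- unfold both ports
    rw [reduce_headers, reduce_headers_alt, if_neg h1, if_neg h1, hg]
    simp only
    rw [hrs]
    rw [hc0', hL0]
    simp only
    -- A's taker
    rw [PySem.List.slice_from_one, pvA1 L 0 [0]]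
    -- B's fold
    rw [pvFoldState L (zipStar rows) _ (pvChain 1 (L.length : Int)) _ _ ?hlast]
    case hlast =>
      intro k0 hk0
      by_cases hn : (1 : Int) < (L.length : Int)
      · rw [PySem.List.pyRange_one_cons hn] at hk0
        simp only [List.head?_cons, Option.some.injEq] at hk0
        rw [← hk0]
        norm_num
        rw [hL0]
        rfl
      · rw [PySem.List.pyRange_one_eq_nil (by omega)] at hk0
        simp at hk0
    have hb0 : (PySem.List.pyRange 1 (L.length : Int)).filter
        (fun k => decide ((PySem.List.pyGet? L k).getD "" ≠ (PySem.List.pyGet? L (k - 1)).getD ""))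
        = pvBnds L 0 := by
      have := pvB1 L 0
      simpa using this
    rw [hb0]
    -- kept list = taker.map g
    have hkept : ([rows.map (fun r => (PySem.List.pyGet? r (0 : Int)).getD "")] ++
          (pvBnds L 0).map (fun k => (PySem.List.pyGet? (zipStar rows) k).getD []))
        = (((0 : Int) :: pvBnds L 0).map
            (fun k => (PySem.List.pyGet? (zipStar rows) k).getD [])) := by
      rw [List.map_cons]
      rw [hc0']
      rfl
    rw [hkept]
    -- each gathered column is the per-row gather
    have hcols : (((0 : Int) :: pvBnds L 0).map
          (fun k => (PySem.List.pyGet? (zipStar rows) k).getD []))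
        = (((0 : Int) :: pvBnds L 0).map
            (fun k => rows.map (fun r => (PySem.List.pyGet? r k).getD ""))) := by
      apply List.map_congr_left
      intro k hk
      rcases List.mem_cons.mp hk with rfl | hk
      · rw [hc0']
        rfl
      · obtain ⟨m, hm1, hm2, hm3⟩ := pvBnds_mem L 0 k hk
        have hk' : k = (((m + 1 : Nat)) : Int) := by push_cast; omega
        have hbound : ∀ r ∈ rows, m + 1 < r.length := by
          intro r hr
          exact (hrows r hr).2 m (by omega) hm3
        rw [hk', pvZipGet (m + 1) rows hrne hbound]
        rfl
    rw [hcols]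
    rw [pvZipMapT rows ((0 : Int) :: pvBnds L 0)
      (fun r k => (PySem.List.pyGet? r k).getD "") (by simp)]
    rfl
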